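-- pv_equiv track=rewrite | github.com/hasanyusufpolat/dosya_asistani_2 | dosya_botu/utils.py | calculate_ocr_confidence
-- ===== SOURCE A (Python) =====
-- def calculate_ocr_confidence(text: str) -> float:
--     """
--     OCR metninin kalitesini hesapla
--
--     Args:
--         text: OCR metni
--
--     Returns:
--         Güven skoru (0-100)
--     """
--     if not text or not text.strip():
--         return 0
--
--     words = text.split()
--     total_chars = len(text)
--     total_words = len(words)
--
--     if total_words == 0:
--         return 0
--
--     # Ortalama kelime uzunluğu (normalde 4-8 arası olmalı)
--     avg_word_length = total_chars / total_words
--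
--     # Anormal kısa kelimeler
--     very_short_words = sum(1 for w in words if len(w) <= 2)
--     short_ratio = very_short_words / total_words
--
--     # Anormal uzun kelimeler (OCR hataları genelde uzun kelimeler oluşturur)
--     very_long_words = sum(1 for w in words if len(w) > 20)
--     long_ratio = very_long_words / total_words
--
--     # Özel karakter oranı
--     special_chars = sum(1 for c in text if not c.isalnum() and not c.isspace())
--     special_ratio = special_chars / total_chars if total_chars > 0 else 0
--
--     # Rakam oranı (çok fazla rakam OCR hatası olabilir)
--     digit_chars = sum(1 for c in text if c.isdigit())
--     digit_ratio = digit_chars / total_chars if total_chars > 0 else 0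
--
--     # Büyük harf oranı (çok fazla büyük harf OCR hatası olabilir)
--     uppercase_chars = sum(1 for c in text if c.isupper())
--     uppercase_ratio = uppercase_chars / total_chars if total_chars > 0 else 0
--
--     # Güven skoru hesapla
--     confidence = 100
--
--     # Ortalama kelime uzunluğu çok düşükse
--     if avg_word_length < 3:
--         confidence -= 30
--     elif avg_word_length < 4:
--         confidence -= 15
--     elif avg_word_length > 15:
--         confidence -= 20
--
--     # Çok fazla kısa kelime varsa
--     if short_ratio > 0.3:
--         confidence -= 25
--     elif short_ratio > 0.2:
--         confidence -= 15
--
--     # Çok fazla uzun kelime varsa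
--     if long_ratio > 0.1:
--         confidence -= 20
--     elif long_ratio > 0.05:
--         confidence -= 10
--
--     # Çok fazla özel karakter varsa
--     if special_ratio > 0.2:
--         confidence -= 20
--     elif special_ratio > 0.1:
--         confidence -= 10
--
--     # Çok fazla rakam varsa (sayısal belgeler hariç)
--     if digit_ratio > 0.3:
--         confidence -= 15
--     elif digit_ratio > 0.2:
--         confidence -= 5
--
--     # Çok fazla büyük harf varsa
--     if uppercase_ratio > 0.5:
--         confidence -= 15
--     elif uppercase_ratio > 0.3:
--         confidence -= 5
--
--     return max(0, min(100, confidence))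
-- ===== SOURCE B (Python) =====
-- def calculate_ocr_confidence(text: str) -> float:
--     # Single-pass tokenizer: no strip()/split(), no per-statistic scans.
--     # One state machine over the characters computes the word count, the
--     # short/long word counts and the character-class counts together.
--     n = len(text)
--     words = short = long_ = special = digit = upper = 0
--     run = 0  # length of the word currently being read
--     for c in text:
--         if c.isspace():
--             if run > 0:
--                 words += 1
--                 if run <= 2:
--                     short += 1
--                 if run > 20:
--                     long_ += 1
--                 run = 0
--         else:
--             if c.isdigit():
--                 digit += 1
--             if c.isupper():
--                 upper += 1
--             if not c.isalnum():
--                 special += 1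
--             run += 1
--     if run > 0:
--         words += 1
--         if run <= 2:
--             short += 1
--         if run > 20:
--             long_ += 1
--     if words == 0:
--         return 0
--     # penalties: all ratio thresholds are multiples of 1/20, so compare in
--     # integers (count/total > k/20  <=>  20*count > k*total); no floats.
--     if n < 3 * words:
--         pen_avg = 30
--     elif n < 4 * words:
--         pen_avg = 15
--     elif n > 15 * words:
--         pen_avg = 20
--     else:
--         pen_avg = 0
--     def band(count, total, hi, lo, p_hi, p_lo):
--         if 20 * count > hi * total:
--             return p_hi
--         if 20 * count > lo * total:
--             return p_lo
--         return 0
--     conf = (100 - pen_avg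
--             - band(short, words, 6, 4, 25, 15)
--             - band(long_, words, 2, 1, 20, 10)
--             - band(special, n, 4, 2, 20, 10)
--             - band(digit, n, 6, 4, 15, 5)
--             - band(upper, n, 10, 6, 15, 5))
--     return max(0, min(100, conf))
-- ===== Notes on version B (the rewrite author's own statement) =====
-- stated objective: alternative
-- what changed: A strips, splits into a word list and runs six separate comprehension scans with float ratio comparisons; B makes a single pass over the characters with a tokenizer state machine that counts words and short/long words on the fly (no strip/split, no word list) and compares all ratio thresholds in integers as multiples of 1/20.
import Mathlib
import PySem

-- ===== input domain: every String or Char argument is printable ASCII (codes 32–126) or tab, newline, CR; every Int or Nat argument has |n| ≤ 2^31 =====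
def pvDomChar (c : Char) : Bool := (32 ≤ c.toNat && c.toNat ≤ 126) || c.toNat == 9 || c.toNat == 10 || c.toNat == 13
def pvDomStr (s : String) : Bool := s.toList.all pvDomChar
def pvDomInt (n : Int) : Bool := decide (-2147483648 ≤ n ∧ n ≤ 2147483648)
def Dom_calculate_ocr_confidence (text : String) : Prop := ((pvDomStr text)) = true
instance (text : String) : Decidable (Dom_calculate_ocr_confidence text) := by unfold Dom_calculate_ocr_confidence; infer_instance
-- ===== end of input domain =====

-- B replaces A's strip/split plus six comprehension scans by ONE tokenizer state machine over the
-- characters (words and short/long words counted on the fly, no word list built) and compares the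
-- ratio thresholds in integers as multiples of 1/20 (alternative decomposition, same O(n) cost).
-- Python float divisions of A are ported as exact rationals.

-- ===== PORT A =====
def calculate_ocr_confidence (text : String) : Int :=
  let cs := text.toList
  if cs = [] ∨ PySem.Chars.strip cs = [] then 0 else
  let words := PySem.Chars.split₀ cs
  let total_chars : Int := cs.length
  let total_words : Int := words.length
  if total_words = 0 then 0 else
  let avg : Rat := (total_chars : Rat) / (total_words : Rat)
  let very_short : Int := (words.map (fun w => if w.length ≤ 2 then (1:Int) else 0)).sum
  let short_ratio : Rat := (very_short : Rat) / (total_words : Rat)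
  let very_long : Int := (words.map (fun w => if 20 < w.length then (1:Int) else 0)).sum
  let long_ratio : Rat := (very_long : Rat) / (total_words : Rat)
  let special : Int := (cs.map (fun c => if ¬ (PySem.Chars.isalnum c = true) ∧ ¬ (PySem.Chars.isspace c = true) then (1:Int) else 0)).sum
  let special_ratio : Rat := if total_chars > 0 then (special : Rat) / (total_chars : Rat) else 0
  let digits : Int := (cs.map (fun c => if PySem.Chars.isdigit c = true then (1:Int) else 0)).sum
  let digit_ratio : Rat := if total_chars > 0 then (digits : Rat) / (total_chars : Rat) else 0
  let uppers : Int := (cs.map (fun c => if PySem.Chars.isupper c = true then (1:Int) else 0)).sum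
  let upper_ratio : Rat := if total_chars > 0 then (uppers : Rat) / (total_chars : Rat) else 0
  let confidence : Int := 100
  let confidence := if avg < 3 then confidence - 30 else if avg < 4 then confidence - 15 else if avg > 15 then confidence - 20 else confidence
  let confidence := if short_ratio > 3/10 then confidence - 25 else if short_ratio > 2/10 then confidence - 15 else confidence
  let confidence := if long_ratio > 1/10 then confidence - 20 else if long_ratio > 5/100 then confidence - 10 else confidence
  let confidence := if special_ratio > 2/10 then confidence - 20 else if special_ratio > 1/10 then confidence - 10 else confidence
  let confidence := if digit_ratio > 3/10 then confidence - 15 else if digit_ratio > 2/10 then confidence - 5 else confidence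
  let confidence := if upper_ratio > 5/10 then confidence - 15 else if upper_ratio > 3/10 then confidence - 5 else confidence
  max 0 (min 100 confidence)

-- ===== PORT B =====
structure OcrSt where
  w : Int
  short : Int
  lng : Int
  special : Int
  digit : Int
  upper : Int
  run : Int
deriving Repr, DecidableEq

def ocrFlush (s : OcrSt) : OcrSt :=
  { s with w := s.w + 1,
           short := if s.run ≤ 2 then s.short + 1 else s.short,
           lng := if s.run > 20 then s.lng + 1 else s.lng,
           run := 0 }

def ocrStep (s : OcrSt) (c : Char) : OcrSt :=
  if PySem.Chars.isspace c = true then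
    if s.run > 0 then ocrFlush s else s
  else
    { s with digit := if PySem.Chars.isdigit c = true then s.digit + 1 else s.digit,
             upper := if PySem.Chars.isupper c = true then s.upper + 1 else s.upper,
             special := if ¬ (PySem.Chars.isalnum c = true) then s.special + 1 else s.special,
             run := s.run + 1 }

def ocrBand (count total hi lo pHi pLo : Int) : Int :=
  if 20 * count > hi * total then pHi else if 20 * count > lo * total then pLo else 0

def calculate_ocr_confidence_alt (text : String) : Int :=
  let cs := text.toList
  let n : Int := cs.length
  let s1 := cs.foldl ocrStep ⟨0, 0, 0, 0, 0, 0, 0⟩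
  let s := if s1.run > 0 then ocrFlush s1 else s1
  if s.w = 0 then 0 else
  let penAvg : Int := if n < 3 * s.w then 30 else if n < 4 * s.w then 15 else if n > 15 * s.w then 20 else 0
  let conf := 100 - penAvg - ocrBand s.short s.w 6 4 25 15 - ocrBand s.lng s.w 2 1 20 10
              - ocrBand s.special n 4 2 20 10 - ocrBand s.digit n 6 4 15 5 - ocrBand s.upper n 10 6 15 5
  max 0 (min 100 conf)

-- ===== PRECONDITION & SPEC =====
def Spec_calculate_ocr_confidence (text : String) (out : Int) : Prop := out = calculate_ocr_confidence_alt text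
instance (text : String) (out : Int) : Decidable (Spec_calculate_ocr_confidence text out) := by unfold Spec_calculate_ocr_confidence; infer_instance

-- ===== CLAIM (what is proved, stated in full; the proofs are below) =====
def Claim_equal_calculate_ocr_confidence : Prop := ∀ (text : String), Dom_calculate_ocr_confidence text → Spec_calculate_ocr_confidence text (calculate_ocr_confidence text)

-- ===== LEMMAS AND PROOFS =====

lemma isspace_not_isdigit (c : Char) (h : PySem.Chars.isspace c = true) : PySem.Chars.isdigit c = false := by
  simp only [PySem.Chars.isspace, decide_eq_true_eq, Bool.or_eq_true, Bool.and_eq_true] at h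
  simp only [PySem.Chars.isdigit, Char.le_def, Bool.and_eq_false_iff, decide_eq_false_iff_not,
    UInt32.le_iff_toNat_le]
  show ¬(48 ≤ Char.toNat c) ∨ ¬(Char.toNat c ≤ 57)
  omega

lemma isspace_not_isupper (c : Char) (h : PySem.Chars.isspace c = true) : PySem.Chars.isupper c = false := by
  simp only [PySem.Chars.isspace, decide_eq_true_eq, Bool.or_eq_true, Bool.and_eq_true] at h
  simp only [PySem.Chars.isupper, Char.le_def, Bool.and_eq_false_iff, decide_eq_false_iff_not,
    UInt32.le_iff_toNat_le]
  show ¬(65 ≤ Char.toNat c) ∨ ¬(Char.toNat c ≤ 90)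
  omega

-- go with an accumulator is acc.reverse ++ go with the empty accumulator
lemma go_acc (cs : List Char) : ∀ (cur : List Char) (acc : List (List Char)), PySem.Chars.split₀.go cs cur acc = acc.reverse ++ PySem.Chars.split₀.go cs cur [] := by
  induction cs with
  | nil =>
    intro cur acc
    by_cases h : cur.isEmpty = true <;> simp [PySem.Chars.split₀.go, h]
  | cons c rest ih =>
    intro cur acc
    by_cases hsp : PySem.Chars.isspace c = true
    · by_cases h : cur.isEmpty = true
      · simp only [PySem.Chars.split₀.go, hsp, h, if_true]
        exact ih [] acc
      · simp only [PySem.Chars.split₀.go, hsp, h, if_true, Bool.false_eq_true, if_false]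
        rw [ih [] (cur.reverse :: acc), ih [] [cur.reverse]]
        simp
    · simp only [PySem.Chars.split₀.go, hsp, Bool.false_eq_true, if_false]
      exact ih (c :: cur) acc

lemma go_ne_nil (l : List Char) : ∀ (cur : List Char) (acc : List (List Char)), cur ≠ [] → PySem.Chars.split₀.go l cur acc ≠ [] := by
  induction l with
  | nil =>
    intro cur acc hcur
    simp [PySem.Chars.split₀.go, List.isEmpty_iff, hcur]
  | cons d ds ihd =>
    intro cur acc hcur
    by_cases hd : PySem.Chars.isspace d = true
    · have h1 : PySem.Chars.split₀.go (d :: ds) cur acc = PySem.Chars.split₀.go ds [] (cur.reverse :: acc) := by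
        simp [PySem.Chars.split₀.go, hd, List.isEmpty_iff, hcur]
      rw [h1, go_acc]
      simp
    · have h1 : PySem.Chars.split₀.go (d :: ds) cur acc = PySem.Chars.split₀.go ds (d :: cur) acc := by
        simp [PySem.Chars.split₀.go, hd]
      rw [h1]
      exact ihd _ _ (by simp)

lemma go_nil_iff (cs : List Char) : PySem.Chars.split₀.go cs [] [] = [] ↔ ∀ c ∈ cs, PySem.Chars.isspace c = true := by
  induction cs with
  | nil => simp [PySem.Chars.split₀.go]
  | cons c rest ih =>
    by_cases hsp : PySem.Chars.isspace c = true
    · have h1 : PySem.Chars.split₀.go (c :: rest) [] [] = PySem.Chars.split₀.go rest [] [] := by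
        simp [PySem.Chars.split₀.go, hsp]
      rw [h1, ih]
      simp [hsp]
    · have h1 : PySem.Chars.split₀.go (c :: rest) [] [] = PySem.Chars.split₀.go rest [c] [] := by
        simp [PySem.Chars.split₀.go, hsp]
      rw [h1]
      constructor
      · intro h
        exact absurd h (go_ne_nil rest [c] [] (by simp))
      · intro h
        exact absurd (h c (by simp)) (by simp [hsp])

lemma strip_nil_iff (cs : List Char) : PySem.Chars.strip cs = [] ↔ ∀ c ∈ cs, PySem.Chars.isspace c = true := by
  simp only [PySem.Chars.strip, PySem.Chars.rstrip, PySem.Chars.lstrip]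
  rw [List.reverse_eq_nil_iff, List.dropWhile_eq_nil_iff]
  constructor
  · intro h c hc
    have hc' : c ∈ List.takeWhile PySem.Chars.isspace cs ++ List.dropWhile PySem.Chars.isspace cs := by
      rw [List.takeWhile_append_dropWhile]; exact hc
    rcases List.mem_append.1 hc' with h1 | h2
    · exact List.mem_takeWhile_imp h1
    · exact h c (by simp [h2])
  · intro h c hc
    exact h c (List.dropWhile_subset _ (by simpa using hc))

-- the tokenizer fold computes exactly the word/char statistics of split₀
lemma ocr_fold_spec (cs : List Char) : ∀ (s : OcrSt) (cur : List Char), s.run = (cur.length : Int) →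
    (if (cs.foldl ocrStep s).run > 0 then ocrFlush (cs.foldl ocrStep s) else cs.foldl ocrStep s) =
      { w := s.w + ((PySem.Chars.split₀.go cs cur []).length : Int),
        short := s.short + (((PySem.Chars.split₀.go cs cur []).countP (fun w => decide (w.length ≤ 2))) : Int),
        lng := s.lng + (((PySem.Chars.split₀.go cs cur []).countP (fun w => decide (20 < w.length))) : Int),
        special := s.special + ((cs.countP (fun c => !(PySem.Chars.isalnum c) && !(PySem.Chars.isspace c))) : Int),
        digit := s.digit + ((cs.countP PySem.Chars.isdigit) : Int),
        upper := s.upper + ((cs.countP PySem.Chars.isupper) : Int),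
        run := 0 } := by
  induction cs with
  | nil =>
    intro s cur hrun
    simp only [List.foldl_nil, List.countP_nil]
    by_cases hcur : cur.isEmpty = true
    · obtain rfl : cur = [] := List.isEmpty_iff.1 hcur
      have h0 : s.run = 0 := by simpa using hrun
      have hgo : PySem.Chars.split₀.go [] ([] : List Char) [] = [] := by
        simp [PySem.Chars.split₀.go]
      rw [if_neg (by omega), hgo]
      cases s
      simp_all
    · have hlen : cur.length ≠ 0 := by
        simpa [List.isEmpty_iff, List.length_eq_zero_iff] using hcur
      have hpos : s.run > 0 := by rw [hrun]; omega
      have hgo : PySem.Chars.split₀.go [] cur [] = [cur.reverse] := by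
        simp [PySem.Chars.split₀.go, hcur]
      rw [if_pos hpos, hgo]
      cases s with
      | mk w sh lg sp dg up run =>
        obtain rfl : run = (cur.length : Int) := hrun
        simp only [ocrFlush, OcrSt.mk.injEq]
        refine ⟨by simp, ?_, ?_, by simp, by simp, by simp, trivial⟩
        · by_cases h2 : cur.length ≤ 2
          · have h2' : ((cur.length : Int)) ≤ 2 := by exact_mod_cast h2
            simp [h2, h2']
          · have h2' : ¬ ((cur.length : Int)) ≤ 2 := by exact_mod_cast h2
            simp [h2, h2']
        · by_cases h2 : 20 < cur.length
          · have h2' : (20 : Int) < (cur.length : Int) := by exact_mod_cast h2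
            simp [h2, h2']
          · have h2' : ¬ ((20 : Int) < (cur.length : Int)) := by exact_mod_cast h2
            simp [h2, h2']
  | cons c rest ih =>
    intro s cur hrun
    rw [List.foldl_cons]
    by_cases hsp : PySem.Chars.isspace c = true
    · have hdg := isspace_not_isdigit c hsp
      have hup := isspace_not_isupper c hsp
      by_cases hcur : cur.isEmpty = true
      · obtain rfl : cur = [] := List.isEmpty_iff.1 hcur
        have h0 : s.run = 0 := by simpa using hrun
        have hstep : ocrStep s c = s := by
          simp only [ocrStep, hsp, if_true]
          rw [if_neg (by omega)]
        have hgo : PySem.Chars.split₀.go (c :: rest) ([] : List Char) [] = PySem.Chars.split₀.go rest [] [] := by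
          simp [PySem.Chars.split₀.go, hsp]
        rw [hstep, ih s [] hrun, hgo]
        simp [hdg, hup, hsp]
      · have hlen : cur.length ≠ 0 := by
          simpa [List.isEmpty_iff, List.length_eq_zero_iff] using hcur
        have hpos : s.run > 0 := by rw [hrun]; omega
        have hstep : ocrStep s c = ocrFlush s := by
          simp only [ocrStep, hsp, if_true]
          rw [if_pos hpos]
        have hgo : PySem.Chars.split₀.go (c :: rest) cur [] = cur.reverse :: PySem.Chars.split₀.go rest [] [] := by
          have h1 : PySem.Chars.split₀.go (c :: rest) cur [] = PySem.Chars.split₀.go rest [] [cur.reverse] := by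
            simp [PySem.Chars.split₀.go, hsp, hcur]
          rw [h1, go_acc]
          simp
        rw [hstep, ih (ocrFlush s) [] (by simp [ocrFlush]), hgo]
        cases s with
        | mk w sh lg sp dg up run =>
          obtain rfl : run = (cur.length : Int) := hrun
          simp only [ocrFlush, OcrSt.mk.injEq, List.countP_cons, List.length_cons,
            List.length_reverse, decide_eq_true_eq]
          refine ⟨by push_cast; ring, ?_, ?_, by simp [hsp], by simp [hdg], by simp [hup], trivial⟩
          · by_cases h2 : cur.length ≤ 2
            · have h2' : ((cur.length : Int)) ≤ 2 := by exact_mod_cast h2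
              simp [h2, h2']
              try push_cast
              try ring
            · have h2' : ¬ ((cur.length : Int)) ≤ 2 := by exact_mod_cast h2
              simp [h2, h2']
          · by_cases h2 : 20 < cur.length
            · have h2' : (20 : Int) < (cur.length : Int) := by exact_mod_cast h2
              simp [h2, h2']
              try push_cast
              try ring
            · have h2' : ¬ ((20 : Int) < (cur.length : Int)) := by exact_mod_cast h2
              simp [h2, h2']
    · have hstep : ocrStep s c =
          { s with digit := if PySem.Chars.isdigit c = true then s.digit + 1 else s.digit,
                   upper := if PySem.Chars.isupper c = true then s.upper + 1 else s.upper,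
                   special := if ¬ (PySem.Chars.isalnum c = true) then s.special + 1 else s.special,
                   run := s.run + 1 } := by
        simp only [ocrStep]
        rw [if_neg hsp]
      have hrun' : (ocrStep s c).run = ((c :: cur).length : Int) := by
        rw [hstep]
        simp [hrun]
        try push_cast
        try ring
      have hgo : PySem.Chars.split₀.go (c :: rest) cur [] = PySem.Chars.split₀.go rest (c :: cur) [] := by
        simp [PySem.Chars.split₀.go, hsp]
      rw [ih (ocrStep s c) (c :: cur) hrun', hgo, hstep]
      cases s with
      | mk w sh lg sp dg up run =>
        simp only [OcrSt.mk.injEq, List.countP_cons]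
        refine ⟨trivial, trivial, trivial, ?_, ?_, ?_, trivial⟩
        · by_cases ha : PySem.Chars.isalnum c = true
          · simp [ha]
          · simp [ha, hsp]
            try push_cast
            try ring
        · by_cases hd : PySem.Chars.isdigit c = true
          · simp [hd]
            try push_cast
            try ring
          · simp [hd]
        · by_cases hu : PySem.Chars.isupper c = true
          · simp [hu]
            try push_cast
            try ring
          · simp [hu]

lemma div_gt_iff (a b n d : Int) (hb : 0 < b) (hd : 0 < d) :
    ((a:Rat)/(b:Rat) > (n:Rat)/(d:Rat)) ↔ a * d > n * b := by
  rw [gt_iff_lt, div_lt_div_iff₀ (by exact_mod_cast hd) (by exact_mod_cast hb)]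
  constructor <;> intro h <;> exact_mod_cast h

lemma sub3 (c1 c2 c3 : Prop) [Decidable c1] [Decidable c2] [Decidable c3] (x a b c : Int) :
    (if c1 then x - a else if c2 then x - b else if c3 then x - c else x) =
      x - (if c1 then a else if c2 then b else if c3 then c else 0) := by
  split_ifs <;> omega

lemma sub2 (c1 c2 : Prop) [Decidable c1] [Decidable c2] (x a b : Int) :
    (if c1 then x - a else if c2 then x - b else x) =
      x - (if c1 then a else if c2 then b else 0) := by
  split_ifs <;> omega

lemma grpAvg (a b : Int) (hb : 0 < b) :
    (if (a:Rat)/(b:Rat) < 3 then (30:Int) else if (a:Rat)/(b:Rat) < 4 then 15 else if (a:Rat)/(b:Rat) > 15 then 20 else 0) =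
      (if a < 3 * b then 30 else if a < 4 * b then 15 else if a > 15 * b then 20 else 0) := by
  have hbq : (0:Rat) < (b:Rat) := by exact_mod_cast hb
  have h1 : ((a:Rat)/(b:Rat) < 3) ↔ a < 3 * b := by
    rw [div_lt_iff₀ hbq]; constructor <;> intro h <;> exact_mod_cast h
  have h2 : ((a:Rat)/(b:Rat) < 4) ↔ a < 4 * b := by
    rw [div_lt_iff₀ hbq]; constructor <;> intro h <;> exact_mod_cast h
  have h3 : ((a:Rat)/(b:Rat) > 15) ↔ a > 15 * b := by
    rw [gt_iff_lt, lt_div_iff₀ hbq]; constructor <;> intro h <;> exact_mod_cast h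
  simp only [h1, h2, h3]

lemma grpBand (a b n1 d1 n2 d2 hi lo p1 p2 : Int) (hb : 0 < b) (hd1 : 0 < d1) (hd2 : 0 < d2)
    (e1 : ∀ x y : Int, x * d1 > n1 * y ↔ 20 * x > hi * y) (e2 : ∀ x y : Int, x * d2 > n2 * y ↔ 20 * x > lo * y) :
    (if (a:Rat)/(b:Rat) > (n1:Rat)/(d1:Rat) then p1 else if (a:Rat)/(b:Rat) > (n2:Rat)/(d2:Rat) then p2 else 0) =
      ocrBand a b hi lo p1 p2 := by
  simp only [ocrBand, div_gt_iff a b n1 d1 hb hd1, div_gt_iff a b n2 d2 hb hd2, e1, e2]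

lemma sum_ite_countP {α : Type} (p : α → Prop) [DecidablePred p] (xs : List α) :
    (xs.map (fun x => if p x then (1:Int) else 0)).sum = ((xs.countP (fun x => decide (p x))) : Int) := by
  rw [← PySem.List.sum_map_ite_one_zero (fun x => decide (p x))]
  simp

-- ===== VERDICT (by name: the statement is the Claim_ definition above) =====
theorem calculate_ocr_confidence_spec : Claim_equal_calculate_ocr_confidence := by
  intro text _
  unfold Spec_calculate_ocr_confidence calculate_ocr_confidence calculate_ocr_confidence_alt
  dsimp only
  have hmain := ocr_fold_spec text.toList ⟨0, 0, 0, 0, 0, 0, 0⟩ [] (by simp)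
  rw [hmain]
  simp only [zero_add]
  by_cases hnil : PySem.Chars.split₀.go text.toList [] [] = []
  · have hA : text.toList = [] ∨ PySem.Chars.strip text.toList = [] :=
      Or.inr ((strip_nil_iff _).2 ((go_nil_iff _).1 hnil))
    rw [if_pos hA]
    rw [if_pos (by simp [hnil])]
  · have hall : ¬ ∀ c ∈ text.toList, PySem.Chars.isspace c = true := fun h => hnil ((go_nil_iff _).2 h)
    have hA : ¬ (text.toList = [] ∨ PySem.Chars.strip text.toList = []) := by
      rintro (h | h)
      · exact hall (by simp [h])
      · exact hall ((strip_nil_iff _).1 h)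
    rw [if_neg hA]
    have hlpos : 0 < (PySem.Chars.split₀.go text.toList [] []).length := List.length_pos_of_ne_nil hnil
    have hwpos : (0:Int) < ((PySem.Chars.split₀.go text.toList [] []).length : Int) := by exact_mod_cast hlpos
    have hcs : text.toList ≠ [] := fun h => hall (by simp [h])
    have hn : (0:Int) < (text.toList.length : Int) := by
      have := List.length_pos_of_ne_nil hcs; exact_mod_cast this
    rw [show PySem.Chars.split₀ text.toList = PySem.Chars.split₀.go text.toList [] [] from rfl]
    rw [if_neg (show ¬ ((((PySem.Chars.split₀.go text.toList [] []).length : Int)) = 0) by omega)]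
    rw [if_pos hn, if_pos hn, if_pos hn]
    rw [sub3, sub2, sub2, sub2, sub2, sub2]
    rw [grpAvg _ _ hwpos]
    rw [show ((3:Rat)/10) = (((3:Int):Rat)/((10:Int):Rat)) by norm_num,
        show ((2:Rat)/10) = (((2:Int):Rat)/((10:Int):Rat)) by norm_num,
        show ((1:Rat)/10) = (((1:Int):Rat)/((10:Int):Rat)) by norm_num,
        show ((5:Rat)/100) = (((1:Int):Rat)/((20:Int):Rat)) by norm_num,
        show ((5:Rat)/10) = (((1:Int):Rat)/((2:Int):Rat)) by norm_num]
    rw [grpBand _ _ 3 10 2 10 6 4 25 15 hwpos (by norm_num) (by norm_num) (fun x y => by omega) (fun x y => by omega),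
        grpBand _ _ 1 10 1 20 2 1 20 10 hwpos (by norm_num) (by norm_num) (fun x y => by omega) (fun x y => by omega),
        grpBand _ _ 2 10 1 10 4 2 20 10 hn (by norm_num) (by norm_num) (fun x y => by omega) (fun x y => by omega),
        grpBand _ _ 3 10 2 10 6 4 15 5 hn (by norm_num) (by norm_num) (fun x y => by omega) (fun x y => by omega),
        grpBand _ _ 1 2 3 10 10 6 15 5 hn (by norm_num) (by norm_num) (fun x y => by omega) (fun x y => by omega)]
    rw [if_neg (show ¬ ((((PySem.Chars.split₀.go text.toList [] []).length : Int)) = 0) by omega)]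
    rw [sum_ite_countP (fun (w : List Char) => w.length ≤ 2),
        sum_ite_countP (fun (w : List Char) => 20 < w.length),
        sum_ite_countP (fun c => ¬ (PySem.Chars.isalnum c = true) ∧ ¬ (PySem.Chars.isspace c = true)),
        sum_ite_countP (fun c => PySem.Chars.isdigit c = true),
        sum_ite_countP (fun c => PySem.Chars.isupper c = true)]
    have e1 : (fun c => decide (¬ (PySem.Chars.isalnum c = true) ∧ ¬ (PySem.Chars.isspace c = true))) =
        (fun c => !(PySem.Chars.isalnum c) && !(PySem.Chars.isspace c)) := by
      funext c
      by_cases h1 : PySem.Chars.isalnum c = true <;> by_cases h2 : PySem.Chars.isspace c = true <;> simp [h1, h2]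
    have e2 : (fun c => decide (PySem.Chars.isdigit c = true)) = PySem.Chars.isdigit := by
      funext c; simp
    have e3 : (fun c => decide (PySem.Chars.isupper c = true)) = PySem.Chars.isupper := by
      funext c; simp
    rw [e1, e2, e3]
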